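-- pv_equiv track=rewrite | github.com/Ajuram-Prasanna/Agent_POC | app.py | is_content_filtered_error
-- ===== SOURCE A (Python) =====
-- def is_content_filtered_error(error_message):
--     """
--     Check if the error message indicates content filtering/guardrails
--     """
--     if not error_message:
--         return False
--
--     error_message = str(error_message).lower()
--     content_filter_indicators = [
--         'content filter',
--         'content_filter',
--         'responsible ai',
--         'safety',
--         'inappropriate',
--         'harmful',
--         'content policy',
--         'violated',
--         'blocked'
--     ]
--     return any(indicator in error_message for indicator in content_filter_indicators)
-- ===== SOURCE B (Python) =====
-- def is_content_filtered_error(error_message):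
--     """
--     Check if the error message indicates content filtering/guardrails.
--     Single left-to-right scan: at each position of the lowered message,
--     test whether any indicator starts there (instead of one full
--     substring search per indicator).
--     """
--     if not error_message:
--         return False
--     msg = str(error_message).lower()
--     content_filter_indicators = (
--         'content filter',
--         'content_filter',
--         'responsible ai',
--         'safety',
--         'inappropriate',
--         'harmful',
--         'content policy',
--         'violated',
--         'blocked',
--     )
--     return any(msg.startswith(ind, i)
--                for i in range(len(msg))
--                for ind in content_filter_indicators)
-- ===== Notes on version B (the rewrite author's own statement) =====
-- stated objective: alternative
-- what changed: Replaces the nine independent substring searches ('ind in msg' per indicator) with one left-to-right positional scan of the message that tests every indicator as a prefix at each position.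
import Mathlib
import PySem

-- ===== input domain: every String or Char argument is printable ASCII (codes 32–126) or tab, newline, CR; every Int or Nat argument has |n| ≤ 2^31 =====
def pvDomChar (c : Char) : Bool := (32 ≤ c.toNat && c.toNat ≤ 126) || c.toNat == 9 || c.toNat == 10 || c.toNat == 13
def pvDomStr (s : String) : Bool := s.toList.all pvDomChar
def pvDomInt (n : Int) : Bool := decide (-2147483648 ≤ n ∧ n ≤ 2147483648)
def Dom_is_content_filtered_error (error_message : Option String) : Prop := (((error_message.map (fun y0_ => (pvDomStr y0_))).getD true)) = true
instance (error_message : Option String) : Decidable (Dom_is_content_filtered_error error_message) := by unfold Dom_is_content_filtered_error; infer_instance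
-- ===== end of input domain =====

-- B replaces the per-indicator substring searches with one positional scan testing each
-- indicator as a prefix at every position; same True/False results (objective: alternative).

-- ===== PORT A =====
def pvIndicatorsA : List String :=
  ["content filter", "content_filter", "responsible ai", "safety", "inappropriate",
   "harmful", "content policy", "violated", "blocked"]

def is_content_filtered_error (error_message : Option String) : Bool :=
  match error_message with
  | none => false                                   -- 'if not error_message' (None is falsy)
  | some s =>
    if PySem.Str.len s = 0 then false               -- '' is falsy too
    else
      let m := PySem.Str.lower s                    -- str(s) is s itself for a str argument
      pvIndicatorsA.any (fun ind => PySem.Str.isIn ind m)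

-- ===== PORT B =====
def pvIndicatorsB : List (List Char) := pvIndicatorsA.map String.toList  -- the same indicator table, as char lists

-- 'any(msg.startswith(ind, i) for i in range(len(msg)) for ind in indicators)':
-- walk the positions (tails) of msg once, testing each indicator as a prefix there.
def pvScan (s : List Char) : Bool :=
  match s with
  | [] => false
  | c :: rest =>
    pvIndicatorsB.any (fun ind => PySem.Chars.startswith (c :: rest) ind) || pvScan rest

def is_content_filtered_error_alt (error_message : Option String) : Bool :=
  match error_message with
  | none => false
  | some s =>
    if PySem.Str.len s = 0 then false
    else pvScan (PySem.Str.lower s).toList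

-- ===== PRECONDITION & SPEC =====
def Spec_is_content_filtered_error (error_message : Option String) (out : Bool) : Prop := out = is_content_filtered_error_alt error_message
instance (error_message : Option String) (out : Bool) : Decidable (Spec_is_content_filtered_error error_message out) := by unfold Spec_is_content_filtered_error; infer_instance

-- ===== CLAIM (what is proved, stated in full; the proofs are below) =====
def Claim_equal_is_content_filtered_error : Prop := ∀ (error_message : Option String), Dom_is_content_filtered_error error_message → Spec_is_content_filtered_error error_message (is_content_filtered_error error_message)

-- ===== LEMMAS AND PROOFS =====

theorem pvNoEmptyStr : ∀ s ∈ pvIndicatorsA, s ≠ "" := by decide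

theorem pvNoEmpty : ∀ ind ∈ pvIndicatorsB, ind ≠ [] := by
  intro ind hmem hnil
  obtain ⟨s, hs, rfl⟩ := List.mem_map.mp hmem
  exact pvNoEmptyStr s hs (by cases s; simp_all)

theorem pvScan_iff (s : List Char) :
    pvScan s = true ↔ ∃ ind ∈ pvIndicatorsB, ind <:+: s := by
  induction s with
  | nil =>
    simp only [pvScan]
    constructor
    · intro h; exact absurd h (by simp)
    · rintro ⟨ind, hmem, hinf⟩
      exact absurd (List.infix_nil.mp hinf) (pvNoEmpty ind hmem)
  | cons c rest ih =>
    simp only [pvScan, Bool.or_eq_true, List.any_eq_true, PySem.Chars.startswith_iff, ih,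
      List.infix_cons_iff]
    constructor
    · rintro (⟨ind, hm, hp⟩ | ⟨ind, hm, hinf⟩)
      exacts [⟨ind, hm, Or.inl hp⟩, ⟨ind, hm, Or.inr hinf⟩]
    · rintro ⟨ind, hm, hp | hinf⟩
      exacts [Or.inl ⟨ind, hm, hp⟩, Or.inr ⟨ind, hm, hinf⟩]

-- ===== VERDICT (by name: the statement is the Claim_ definition above) =====
theorem is_content_filtered_error_spec : Claim_equal_is_content_filtered_error := by
  intro em _
  unfold Spec_is_content_filtered_error is_content_filtered_error is_content_filtered_error_alt
  cases em with
  | none => rfl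
  | some s =>
    dsimp only
    by_cases h : PySem.Str.len s = 0
    · simp only [if_pos h]
    · simp only [if_neg h]
      rw [Bool.eq_iff_iff, pvScan_iff]
      simp only [pvIndicatorsB, List.any_eq_true, PySem.Str.isIn_iff_infix, List.mem_map]
      constructor
      · rintro ⟨ind, hmem, hinf⟩; exact ⟨ind.toList, ⟨ind, hmem, rfl⟩, hinf⟩
      · rintro ⟨_, ⟨ind, hmem, rfl⟩, hinf⟩; exact ⟨ind, hmem, hinf⟩
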